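-- pv_equiv track=rewrite | github.com/vodaioan03/operations-conversions-logic | application.py | transform_number
-- ===== SOURCE A (Python) =====
-- def transform_number(number:int,base:int):
--   list_of_number = []
--   number_ok = 1
--   while number > 0:
--     list_of_number.append(number%10)
--     if number%10 >= base:
--       number_ok = 0
--       break
--     number //= 10
--   return list_of_number,number_ok
-- ===== SOURCE B (Python) =====
-- def transform_number(number: int, base: int):
--     # Pass 1: extract all decimal digits, least-significant first.
--     digits = []
--     n = number
--     while n > 0:
--         digits.append(n % 10)
--         n //= 10
--     # Pass 2: find the first digit not valid in `base`.
--     for i, d in enumerate(digits):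
--         if d >= base:
--             return digits[:i + 1], 0
--     return digits, 1
-- ===== Notes on version B (the rewrite author's own statement) =====
-- stated objective: alternative
-- what changed: B splits A's fused break-on-bad-digit loop into two passes: it first extracts the complete digit list of the number, then scans it for the first digit >= base, returning the truncated prefix with flag 0 or the full list with flag 1.
import Mathlib
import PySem

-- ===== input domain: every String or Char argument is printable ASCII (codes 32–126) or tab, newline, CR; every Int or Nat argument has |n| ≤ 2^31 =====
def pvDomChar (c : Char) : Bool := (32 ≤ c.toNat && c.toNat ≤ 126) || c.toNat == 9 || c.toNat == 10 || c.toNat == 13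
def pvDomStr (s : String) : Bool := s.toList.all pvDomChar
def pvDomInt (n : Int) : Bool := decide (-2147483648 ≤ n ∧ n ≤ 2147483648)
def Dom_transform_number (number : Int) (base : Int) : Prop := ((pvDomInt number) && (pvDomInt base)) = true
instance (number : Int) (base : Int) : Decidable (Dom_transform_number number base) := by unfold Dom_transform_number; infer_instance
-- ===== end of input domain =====

-- B replaces A's fused break-on-bad-digit loop with two passes (extract all digits, then scan); same cost, different decomposition.


-- ===== PORT A =====
-- A's while loop: append number%10, break with flag 0 on a digit ≥ base, else number //= 10.
def transform_number_loop (base : Int) (number : Int) (acc : List Int) :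
    List Int × Int :=
  if h : number > 0 then
    let d := PySem.Int.mod number 10
    let acc' := acc ++ [d]
    if d ≥ base then (acc', 0)
    else transform_number_loop base (PySem.Int.floordiv number 10) acc'
  else (acc, 1)
termination_by number.toNat
decreasing_by
  have h10 : (0:Int) < 10 := by norm_num
  have := PySem.Int.floordiv_eq_ediv_of_pos (a := number) h10
  omega

def transform_number (number : Int) (base : Int) : List Int × Int :=
  transform_number_loop base number []

-- ===== PORT B =====
-- Pass 1 of Source B: the digit-extraction while loop (no break).
def tn_extract (n : Int) (acc : List Int) : List Int :=
  if h : n > 0 then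
    tn_extract (PySem.Int.floordiv n 10) (acc ++ [PySem.Int.mod n 10])
  else acc
termination_by n.toNat
decreasing_by
  have h10 : (0:Int) < 10 := by norm_num
  have := PySem.Int.floordiv_eq_ediv_of_pos (a := n) h10
  omega

-- Pass 2 of Source B: the `for i, d in enumerate(digits)` scan; `digits[:i+1]` is
-- `digits.take (i+1)` (exact: i ≥ 0 and Python's slice with nonneg stop = take).
def tn_scan (digits : List Int) (base : Int) : List Int → Nat → List Int × Int
  | [], _ => (digits, 1)
  | d :: rest, i =>
    if d ≥ base then (digits.take (i + 1), 0)
    else tn_scan digits base rest (i + 1)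

def transform_number_alt (number : Int) (base : Int) : List Int × Int :=
  let digits := tn_extract number []
  tn_scan digits base digits 0

-- ===== PRECONDITION & SPEC =====
def Spec_transform_number (number : Int) (base : Int) (out : List Int × Int) : Prop := out = transform_number_alt number base
instance (number : Int) (base : Int) (out : List Int × Int) : Decidable (Spec_transform_number number base out) := by unfold Spec_transform_number; infer_instance

-- ===== CLAIM (what is proved, stated in full; the proofs are below) =====
def Claim_equal_transform_number : Prop := ∀ (number : Int) (base : Int), Dom_transform_number number base → Spec_transform_number number base (transform_number number base)

-- ===== LEMMAS AND PROOFS =====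

-- common reference: the pure digit list of n (LSB first)
def tn_digits (n : Int) : List Int :=
  if h : n > 0 then PySem.Int.mod n 10 :: tn_digits (PySem.Int.floordiv n 10) else []
termination_by n.toNat
decreasing_by
  have h10 : (0:Int) < 10 := by norm_num
  have := PySem.Int.floordiv_eq_ediv_of_pos (a := n) h10
  omega

-- common reference: fused scan over a digit list
def tn_fuse (base : Int) : List Int → List Int × Int
  | [] => ([], 1)
  | d :: t =>
    if d ≥ base then ([d], 0)
    else
      let r := tn_fuse base t
      (d :: r.1, r.2)

lemma tn_extract_eq (n : Int) : ∀ acc, tn_extract n acc = acc ++ tn_digits n := by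
  induction n using tn_digits.induct with
  | case1 n h ih =>
      intro acc
      have hf : PySem.Int.floordiv n 10 = n / 10 := PySem.Int.floordiv_eq_ediv_of_pos (by norm_num)
      simp only [hf] at ih
      rw [tn_extract, tn_digits]
      simp [h, ih]
  | case2 n h =>
      intro acc
      rw [tn_extract, tn_digits]
      simp [h]

lemma tn_loop_eq (base n : Int) : ∀ acc,
    transform_number_loop base n acc =
      (acc ++ (tn_fuse base (tn_digits n)).1, (tn_fuse base (tn_digits n)).2) := by
  induction n using tn_digits.induct with
  | case1 n h ih =>
      intro acc
      rw [transform_number_loop, tn_digits]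
      simp only [h, dite_true]
      have hf : PySem.Int.floordiv n 10 = n / 10 := PySem.Int.floordiv_eq_ediv_of_pos (by norm_num)
      simp only [hf] at ih
      have hm : PySem.Int.mod n 10 = n % 10 := PySem.Int.mod_eq_emod_of_pos (by norm_num)
      by_cases hd : base ≤ n % 10
      · simp [tn_fuse, hd]
      · simp [tn_fuse, hd, ih]
  | case2 n h =>
      intro acc
      rw [transform_number_loop, tn_digits]
      simp [h, tn_fuse]

lemma tn_scan_eq (base : Int) : ∀ (suffix pref : List Int),
    (∀ d ∈ pref, ¬ d ≥ base) →
    tn_scan (pref ++ suffix) base suffix pref.length =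
      (pref ++ (tn_fuse base suffix).1, (tn_fuse base suffix).2) := by
  intro suffix
  induction suffix with
  | nil => intro pref _; simp [tn_scan, tn_fuse]
  | cons d rest ih =>
      intro pref hpref
      by_cases hd : d ≥ base
      · simp [tn_scan, tn_fuse, hd, List.take_append]
      · have h2 : ∀ x ∈ pref ++ [d], ¬ x ≥ base := by
          intro x hx
          rcases List.mem_append.1 hx with h | h
          · exact hpref x h
          · simp at h; subst h; exact hd
        have := ih (pref ++ [d]) h2
        simp only [List.append_assoc, List.singleton_append, List.length_append,
          List.length_singleton] at this
        simp [tn_scan, tn_fuse, hd, this]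

-- ===== VERDICT (by name: the statement is the Claim_ definition above) =====
theorem transform_number_spec : Claim_equal_transform_number := by
  intro number base _
  unfold Spec_transform_number transform_number transform_number_alt
  rw [tn_loop_eq, tn_extract_eq]
  simpa using (tn_scan_eq base (tn_digits number) [] (by simp)).symm
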